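-- pv_equiv track=rewrite | github.com/codelink-multifeature/A-Multi-Modal-CNN-Transformer-Fusion-Network | process/1.CT image extraction and processing/2D slice.py | MAX1
-- ===== SOURCE A (Python) =====
-- def MAX1(tensor1,min1):
--     i=0
--     U=0
--     ma=0
--     c=0
--     for u in range(len(tensor1)):
--       c=0
--       for i in range(len(tensor1)):
--          if min1==tensor1[i]:
--             c=1
--             break
--       if c==1:
--         min1=min1+1
--         continue
--       else:
--         ma=min1-1
--         break
--     return ma#Return the first circle
-- ===== SOURCE B (Python) =====
-- def MAX1(tensor1, min1):
--     expected = min1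
--     for v in sorted(v for v in tensor1 if v >= min1):
--         if v == expected:
--             expected += 1
--         elif v > expected:
--             break
--     return expected - 1
-- ===== Notes on version B (the rewrite author's own statement) =====
-- stated objective: alternative
-- what changed: Replaces A's per-candidate full membership rescan with one sort of the values >= min1 followed by a single linear gap-scan, and returns the first absent value minus one instead of A's leftover 0 when every candidate in the length-bounded window is present.
-- intended difference: On inputs where every value min1..min1+len(tensor1)-1 occurs in tensor1 (except the corner where the first value >= min1 absent from tensor1 is exactly 1), A's length-bounded loop falls off the end and returns its accidental initialiser 0, while B returns the first absent value >= min1 minus one, which is what the function's purpose ('return the first circle') calls for. — e.g. on MAX1([5], 5): A returns 0, B returns 5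
import Mathlib
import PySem

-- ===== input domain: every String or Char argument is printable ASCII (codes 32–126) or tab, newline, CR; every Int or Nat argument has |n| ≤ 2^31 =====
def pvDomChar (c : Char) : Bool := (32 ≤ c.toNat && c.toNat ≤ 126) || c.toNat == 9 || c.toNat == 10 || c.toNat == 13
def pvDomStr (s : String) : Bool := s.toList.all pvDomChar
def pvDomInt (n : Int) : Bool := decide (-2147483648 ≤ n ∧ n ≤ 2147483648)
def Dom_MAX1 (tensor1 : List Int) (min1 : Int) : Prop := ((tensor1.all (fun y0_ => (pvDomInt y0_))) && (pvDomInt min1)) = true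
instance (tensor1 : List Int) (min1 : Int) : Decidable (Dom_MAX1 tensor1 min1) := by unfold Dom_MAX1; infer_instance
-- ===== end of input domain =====

-- B replaces A's per-candidate full membership rescan with one sort of the values ≥ min1
-- followed by a single linear gap-scan (objective: alternative algorithm).

-- ===== PORT A =====
-- inner 'for i in range(len(tensor1)): if min1==tensor1[i]: c=1; break' — c after the loop
def pvInnerA : List Int → Int → Int
  | [], _ => 0
  | v :: rest, m => if m == v then 1 else pvInnerA rest m

-- outer 'for u in range(len(tensor1))' with state (min1, ma); break returns min1-1
def pvOuterA : Nat → List Int → Int → Int → Int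
  | 0, _, _, ma => ma
  | u + 1, t, m, ma => if pvInnerA t m == 1 then pvOuterA u t (m + 1) ma else m - 1

def MAX1 (tensor1 : List Int) (min1 : Int) : Int :=
  pvOuterA tensor1.length tensor1 min1 0

-- ===== PORT B =====
-- the scan loop with its break: v==expected → advance, expected<v → break, v<expected (duplicate) → skip
def pvScanB : List Int → Int → Int
  | [], e => e
  | v :: rest, e => if v == e then pvScanB rest (e + 1) else if e < v then e else pvScanB rest e

def MAX1_alt (tensor1 : List Int) (min1 : Int) : Int :=
  let rel := PySem.List.sorted (tensor1.filter (fun v => decide (min1 ≤ v))) (fun x => x) false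
  pvScanB rel min1 - 1

-- ===== PRECONDITION & SPEC =====
-- On inputs where every value min1..min1+len(tensor1)-1 occurs in tensor1, A's length-bounded
-- loop falls off the end and returns its leftover initialiser 0, while B returns the first
-- value ≥ min1 absent from tensor1, minus one — the value the function's purpose calls for;
-- the sole corner where that first absent value is exactly 1 (both return 0) is outside D_.
def D_MAX1 (tensor1 : List Int) (min1 : Int) : Prop :=
  (∀ j : Nat, j < tensor1.length → min1 + (j : Int) ∈ tensor1) ∧
  ¬ (min1 ≤ 1 ∧ (1 : Int) ∉ tensor1 ∧ ∀ j : Nat, j < (1 - min1).toNat → min1 + (j : Int) ∈ tensor1)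
instance (tensor1 : List Int) (min1 : Int) : Decidable (D_MAX1 tensor1 min1) := by unfold D_MAX1; infer_instance

def Spec_MAX1 (tensor1 : List Int) (min1 : Int) (out : Int) : Prop := ¬ D_MAX1 tensor1 min1 → out = MAX1_alt tensor1 min1
instance (tensor1 : List Int) (min1 : Int) (out : Int) : Decidable (Spec_MAX1 tensor1 min1 out) := by unfold Spec_MAX1; infer_instance

def pvDiffWitness_MAX1 : List Int × Int := ([5], 5)
def pvDiffWitnessOut_MAX1 : Int × Int := (0, 5)

-- ===== CLAIM (what is proved, stated in full; the proofs are below) =====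
def Claim_unchanged_MAX1 : Prop := ∀ (tensor1 : List Int) (min1 : Int), Dom_MAX1 tensor1 min1 → Spec_MAX1 tensor1 min1 (MAX1 tensor1 min1)
def Claim_changed_MAX1 : Prop := Dom_MAX1 (pvDiffWitness_MAX1.1) (pvDiffWitness_MAX1.2) ∧ D_MAX1 (pvDiffWitness_MAX1.1) (pvDiffWitness_MAX1.2) ∧ MAX1 (pvDiffWitness_MAX1.1) (pvDiffWitness_MAX1.2) = pvDiffWitnessOut_MAX1.1 ∧ MAX1_alt (pvDiffWitness_MAX1.1) (pvDiffWitness_MAX1.2) = pvDiffWitnessOut_MAX1.2 ∧ pvDiffWitnessOut_MAX1.1 ≠ pvDiffWitnessOut_MAX1.2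
def Claim_exact_MAX1 : Prop := ∀ (tensor1 : List Int) (min1 : Int), Dom_MAX1 tensor1 min1 → D_MAX1 tensor1 min1 → MAX1 tensor1 min1 ≠ MAX1_alt tensor1 min1

-- ===== LEMMAS AND PROOFS =====

theorem pvInnerA_eq (t : List Int) (m : Int) : pvInnerA t m = if m ∈ t then 1 else 0 := by
  induction t with
  | nil => simp [pvInnerA]
  | cons v rest ih =>
    simp only [pvInnerA, List.mem_cons]
    by_cases h : m = v <;> simp [h, ih]

theorem pvOuterA_all (t : List Int) : ∀ (u : Nat) (m : Int),
    (∀ j : Nat, j < u → (m + (j : Int)) ∈ t) → pvOuterA u t m 0 = 0 := by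
  intro u
  induction u with
  | zero => intro m _; rfl
  | succ u ih =>
    intro m h
    have h0 : m ∈ t := by simpa using h 0 (Nat.succ_pos u)
    simp only [pvOuterA, pvInnerA_eq, h0, if_pos]
    simp only [beq_self_eq_true, if_pos]
    apply ih
    intro j hj
    have := h (j + 1) (by omega)
    have e : m + 1 + (j : Int) = m + ((j : Nat) + 1 : Nat) := by push_cast; ring
    rw [e]; exact this

theorem pvOuterA_find (t : List Int) : ∀ (u k : Nat) (m : Int),
    k < u → (m + (k : Int)) ∉ t → (∀ i : Nat, i < k → (m + (i : Int)) ∈ t) →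
    pvOuterA u t m 0 = m + (k : Int) - 1 := by
  intro u
  induction u with
  | zero => intro k m hk; omega
  | succ u ih =>
    intro k m hk hnot hall
    cases k with
    | zero =>
      have h0 : m ∉ t := by simpa using hnot
      simp [pvOuterA, pvInnerA_eq, h0]
    | succ k =>
      have h0 : m ∈ t := by simpa using hall 0 (Nat.succ_pos k)
      simp only [pvOuterA, pvInnerA_eq, h0, if_pos, beq_self_eq_true]
      have hnot' : (m + 1 + (k : Int)) ∉ t := by
        have e : m + 1 + (k : Int) = m + ((k : Nat) + 1 : Nat) := by push_cast; ring
        rw [e]; exact hnot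
      have hall' : ∀ i : Nat, i < k → (m + 1 + (i : Int)) ∈ t := by
        intro i hi
        have := hall (i + 1) (by omega)
        have e : m + 1 + (i : Int) = m + ((i : Nat) + 1 : Nat) := by push_cast; ring
        rw [e]; exact this
      have := ih k (m + 1) (by omega) hnot' hall'
      rw [this]; push_cast; ring

theorem pvScanB_ge (rel : List Int) : ∀ e : Int, e ≤ pvScanB rel e := by
  induction rel with
  | nil => intro e; simp [pvScanB]
  | cons v rest ih =>
    intro e
    simp only [pvScanB]
    split_ifs with h1 h2
    · have := ih (e + 1); omega
    · omega
    · exact ih e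

theorem pvScanB_not_mem (rel : List Int) (hp : rel.Pairwise (· ≤ ·)) :
    ∀ e : Int, pvScanB rel e ∉ rel := by
  induction rel with
  | nil => intro e; simp
  | cons v rest ih =>
    intro e
    have hv : ∀ y ∈ rest, v ≤ y := (List.pairwise_cons.mp hp).1
    have hrest := (List.pairwise_cons.mp hp).2
    simp only [pvScanB, List.mem_cons]
    split_ifs with h1 h2
    · have hge := pvScanB_ge rest (e + 1)
      have hb : v = e := by simpa using h1
      push_neg
      exact ⟨by omega, ih hrest (e + 1)⟩
    · push_neg
      constructor
      · omega
      · intro hmem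
        have := hv e hmem; omega
    · have hb : ¬ v = e := by simpa using h1
      have hge := pvScanB_ge rest e
      push_neg
      exact ⟨by omega, ih hrest e⟩

theorem pvScanB_mem_below (rel : List Int) (hp : rel.Pairwise (· ≤ ·)) :
    ∀ e x : Int, e ≤ x → x < pvScanB rel e → x ∈ rel := by
  induction rel with
  | nil => intro e x h1 h2; simp [pvScanB] at h2; omega
  | cons v rest ih =>
    intro e x h1 h2
    have hrest := (List.pairwise_cons.mp hp).2
    simp only [pvScanB] at h2
    simp only [List.mem_cons]
    split_ifs at h2 with c1 c2
    · have hb : v = e := by simpa using c1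
      by_cases hx : x = e
      · exact Or.inl (by omega)
      · exact Or.inr (ih hrest (e + 1) x (by omega) h2)
    · omega
    · exact Or.inr (ih hrest e x h1 h2)

-- membership in B's sorted filtered list, in terms of tensor1
theorem pv_mem_rel (t : List Int) (m x : Int) :
    x ∈ PySem.List.sorted (t.filter (fun v => decide (m ≤ v))) (fun x => x) false ↔
      (m ≤ x ∧ x ∈ t) := by
  rw [PySem.List.mem_sorted, List.mem_filter]
  simp [and_comm]

-- characterisation of B's scan result e = pvScanB rel m: m ≤ e, e ∉ t, [m,e) ⊆ t
theorem pvB_char (t : List Int) (m : Int) :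
    m ≤ pvScanB (PySem.List.sorted (t.filter (fun v => decide (m ≤ v))) (fun x => x) false) m ∧
    pvScanB (PySem.List.sorted (t.filter (fun v => decide (m ≤ v))) (fun x => x) false) m ∉ t ∧
    (∀ x : Int, m ≤ x → x < pvScanB (PySem.List.sorted (t.filter (fun v => decide (m ≤ v))) (fun x => x) false) m → x ∈ t) := by
  set rel := PySem.List.sorted (t.filter (fun v => decide (m ≤ v))) (fun x => x) false with hrel
  have hp : rel.Pairwise (· ≤ ·) := by
    simpa using PySem.List.sorted_pairwise (t.filter (fun v => decide (m ≤ v))) (fun x => x)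
  have hge := pvScanB_ge rel m
  refine ⟨hge, ?_, ?_⟩
  · intro hmem
    exact pvScanB_not_mem rel hp m ((pv_mem_rel t m _).mpr ⟨hge, hmem⟩)
  · intro x h1 h2
    exact ((pv_mem_rel t m x).mp (pvScanB_mem_below rel hp m x h1 h2)).2

theorem MAX1_unchanged (t : List Int) (m : Int) (hnd : ¬ D_MAX1 t m) :
    MAX1 t m = MAX1_alt t m := by
  classical
  obtain ⟨hge, hnotm, hbelow⟩ := pvB_char t m
  set e := pvScanB (PySem.List.sorted (t.filter (fun v => decide (m ≤ v))) (fun x => x) false) m with he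
  have haltB : MAX1_alt t m = e - 1 := rfl
  by_cases hAll : ∀ j : Nat, j < t.length → (m + (j : Int)) ∈ t
  · -- all window present: ¬D_ forces the corner, so e = 1 and both sides are 0
    have hA : MAX1 t m = 0 := pvOuterA_all t t.length m hAll
    have hcor : m ≤ 1 ∧ (1 : Int) ∉ t ∧ ∀ j : Nat, j < (1 - m).toNat → m + (j : Int) ∈ t := by
      by_contra hc
      exact hnd ⟨hAll, hc⟩
    obtain ⟨hm1, h1not, hallbelow⟩ := hcor
    have he1 : e = 1 := by
      have h1 : e ≤ 1 := by
        by_contra hc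
        push_neg at hc
        exact h1not (hbelow 1 hm1 hc)
      have h2 : 1 ≤ e := by
        by_contra hc
        push_neg at hc
        have hj : ((e - m).toNat : Int) = e - m := Int.toNat_of_nonneg (by omega)
        have := hallbelow (e - m).toNat (by omega)
        rw [hj, show m + (e - m) = e by ring] at this
        exact hnotm this
      omega
    rw [hA, haltB, he1]; norm_num
  · push_neg at hAll
    obtain ⟨j0, hj0⟩ := hAll
    have hex : ∃ j : Nat, j < t.length ∧ (m + (j : Int)) ∉ t := ⟨j0, hj0⟩
    set k := Nat.find hex with hk
    obtain ⟨hklt, hknot⟩ := Nat.find_spec hex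
    have hkmin : ∀ i : Nat, i < k → (m + (i : Int)) ∈ t := by
      intro i hi
      have := Nat.find_min hex hi
      push_neg at this
      exact this (by omega)
    have hA : MAX1 t m = m + (k : Int) - 1 := pvOuterA_find t t.length k m hklt hknot hkmin
    have hek : e = m + (k : Int) := by
      have h1 : e ≤ m + (k : Int) := by
        by_contra hc
        push_neg at hc
        exact hknot (hbelow _ (by omega) hc)
      have h2 : m + (k : Int) ≤ e := by
        by_contra hc
        push_neg at hc
        have hj : ((e - m).toNat : Int) = e - m := Int.toNat_of_nonneg (by omega)
        have := hkmin (e - m).toNat (by omega)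
        rw [hj, show m + (e - m) = e by ring] at this
        exact hnotm this
      omega
    rw [hA, haltB, hek]

-- ===== VERDICT (by name: the statements are the Claim_ definitions above) =====
theorem MAX1_spec : Claim_unchanged_MAX1 := by
  intro t m _ hnd
  exact MAX1_unchanged t m hnd

theorem MAX1_changed : Claim_changed_MAX1 := by unfold Claim_changed_MAX1; decide

theorem MAX1_tight : Claim_exact_MAX1 := by
  intro t m _ hd
  obtain ⟨hAll, hncor⟩ := hd
  obtain ⟨hge, hnotm, hbelow⟩ := pvB_char t m
  set e := pvScanB (PySem.List.sorted (t.filter (fun v => decide (m ≤ v))) (fun x => x) false) m with he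
  have hA : MAX1 t m = 0 := pvOuterA_all t t.length m hAll
  have haltB : MAX1_alt t m = e - 1 := rfl
  rw [hA, haltB]
  intro hc
  have he1 : e = 1 := by omega
  apply hncor
  refine ⟨by omega, by rw [← he1]; exact hnotm, ?_⟩
  intro j hj
  apply hbelow
  · omega
  · have : (j : Int) < 1 - m := by
      have := Int.toNat_of_nonneg (show (0:Int) ≤ 1 - m by omega)
      omega
    omega
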